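-- pv_equiv track=rewrite | github.com/qLeviathan/phase_locked | phi_mamba/encoding.py | binary_from_zeckendorf
-- ===== SOURCE A (Python) =====
-- from typing import List, Optional, Tuple
--
-- def binary_from_zeckendorf(zeck: List[int], max_fib_index: int = 10) -> str:
--     """
--     Convert Zeckendorf decomposition to binary representation
--
--     This shows the "emergent bit pattern" from topology:
--     - 1 = hole exists at that scale
--     - 0 = no hole at that scale
--     - Gap constraint naturally enforced
--
--     Args:
--         zeck: Zeckendorf decomposition
--         max_fib_index: Maximum Fibonacci index to consider
--
--     Returns:
--         Binary string representation
--     """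
--     # Create binary representation
--     binary = ['0'] * max_fib_index
--
--     for fib in zeck:
--         # Find which Fibonacci number this is
--         idx = 1
--         a, b = 1, 2
--         while b < fib:
--             a, b = b, a + b
--             idx += 1
--
--         if b == fib and idx < max_fib_index:
--             binary[max_fib_index - idx - 1] = '1'
--
--     return ''.join(binary)
-- ===== SOURCE B (Python) =====
-- def binary_from_zeckendorf(zeck, max_fib_index=10):
--     # Index candidate Fibonacci positions against a set of zeck, instead of
--     # re-scanning the Fibonacci sequence for every element.
--     s = set(zeck)
--     idxs = set()
--     if s:
--         m = max(s)
--         a, b, idx = 1, 2, 1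
--         while idx < max_fib_index and b <= m:
--             if b in s:
--                 idxs.add(idx)
--             a, b = b, a + b
--             idx += 1
--     return ''.join('1' if max_fib_index - p - 1 in idxs else '0'
--                    for p in range(max_fib_index))
-- ===== Notes on version B (the rewrite author's own statement) =====
-- stated objective: alternative
-- what changed: Instead of rescanning the Fibonacci sequence from the start for every element of zeck, B builds a set of zeck once, walks the Fibonacci positions a single time (bounded by max(zeck)) collecting the indices that are hit, and constructs the output string by a per-position comprehension rather than by mutating a list of '0's.
import Mathlib
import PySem

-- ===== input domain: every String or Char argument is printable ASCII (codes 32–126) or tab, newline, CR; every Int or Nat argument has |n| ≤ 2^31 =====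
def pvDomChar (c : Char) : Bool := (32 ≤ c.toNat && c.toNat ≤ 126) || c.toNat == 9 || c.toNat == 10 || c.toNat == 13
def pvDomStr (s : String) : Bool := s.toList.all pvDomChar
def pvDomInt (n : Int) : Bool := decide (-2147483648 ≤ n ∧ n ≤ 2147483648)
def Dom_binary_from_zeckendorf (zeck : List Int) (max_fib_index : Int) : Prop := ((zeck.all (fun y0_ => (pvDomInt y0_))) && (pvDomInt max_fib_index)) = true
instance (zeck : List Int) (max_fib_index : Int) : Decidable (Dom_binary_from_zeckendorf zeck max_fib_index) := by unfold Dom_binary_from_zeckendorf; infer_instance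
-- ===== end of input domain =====

-- B replaces A's per-element Fibonacci rescans by one walk over candidate Fibonacci
-- positions with set membership (objective: alternative decomposition).

-- ===== PORT A =====
-- the inner `while b < fib: a, b = b, a + b; idx += 1` loop of A
-- (the two proof arguments only establish termination; the computation is A's)
def fibFindA (a b idx fib : Int) (ha : 0 < a) (hab : a < b) : Int × Int × Int :=
  if h : b < fib then
    fibFindA b (a + b) (idx + 1) fib (ha.trans hab) (lt_add_of_pos_left b ha)
  else (a, b, idx)
termination_by (fib - b).toNat
decreasing_by
  exact (Int.toNat_lt_toNat (sub_pos.2 h)).2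
    (sub_lt_sub_left (lt_add_of_pos_left b ha) fib)

-- A's inner loop started from its initial state (idx 1, first candidate value 2)
def fibFindA0 (fib : Int) : Int × Int × Int :=
  fibFindA 1 2 1 fib Int.zero_lt_one one_lt_two

-- body of A's `for fib in zeck:` loop
def stepA (max_fib_index : Int) (bin : List Char) (fib : Int) : List Char :=
  let r := fibFindA0 fib
  if r.2.1 = fib ∧ r.2.2 < max_fib_index then
    PySem.List.pySetD bin (max_fib_index - r.2.2 - 1) '1'
  else bin

def binary_from_zeckendorf (zeck : List Int) (max_fib_index : Int) : String :=
  String.mk (zeck.foldl (stepA max_fib_index) (List.replicate max_fib_index.toNat '0'))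

-- ===== PORT B =====
-- B's `while idx < max_fib_index and b <= m:` loop collecting the set of hit indices
def fibCollectB (s : PySem.Set Int) (m max_fib_index : Int) (a b idx : Int)
    (acc : PySem.Set Int) (ha : 0 < a) (hab : a < b) : PySem.Set Int :=
  if h : idx < max_fib_index ∧ b ≤ m then
    fibCollectB s m max_fib_index b (a + b) (idx + 1)
      (if PySem.Set.contains s b then PySem.Set.add acc idx else acc)
      (ha.trans hab) (lt_add_of_pos_left b ha)
  else acc
termination_by (m + 1 - b).toNat
decreasing_by
  exact (Int.toNat_lt_toNat (sub_pos.2 (Int.lt_add_one_iff.2 h.2))).2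
    (sub_lt_sub_left (lt_add_of_pos_left b ha) (m + 1))

def binary_from_zeckendorf_alt (zeck : List Int) (max_fib_index : Int) : String :=
  let s : PySem.Set Int := PySem.Set.ofList zeck
  let idxs : PySem.Set Int :=
    match PySem.List.max? s (fun x => x) with
    | none => PySem.Set.empty
    | some m => fibCollectB s m max_fib_index 1 2 1 PySem.Set.empty Int.zero_lt_one one_lt_two
  String.mk ((List.range max_fib_index.toNat).map
    (fun p : Nat => if PySem.Set.contains idxs (max_fib_index - (p : Int) - 1) then '1' else '0'))

-- ===== PRECONDITION & SPEC =====
def Spec_binary_from_zeckendorf (zeck : List Int) (max_fib_index : Int) (out : String) : Prop := out = binary_from_zeckendorf_alt zeck max_fib_index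
instance (zeck : List Int) (max_fib_index : Int) (out : String) : Decidable (Spec_binary_from_zeckendorf zeck max_fib_index out) := by unfold Spec_binary_from_zeckendorf; infer_instance

-- ===== CLAIM (what is proved, stated in full; the proofs are below) =====
def Claim_equal_binary_from_zeckendorf : Prop := ∀ (zeck : List Int) (max_fib_index : Int), Dom_binary_from_zeckendorf zeck max_fib_index → Spec_binary_from_zeckendorf zeck max_fib_index (binary_from_zeckendorf zeck max_fib_index)

-- ===== LEMMAS AND PROOFS =====

-- the Fibonacci state (a, b) after n advances from (1, 2)
def fp : Nat → Int × Int
  | 0 => (1, 2)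
  | n + 1 => ((fp n).2, (fp n).1 + (fp n).2)

theorem fp_pos (n : Nat) : 0 < (fp n).1 ∧ (fp n).1 < (fp n).2 := by
  induction n with
  | zero => simp [fp]
  | succ n ih => simp [fp]; omega

theorem fp_lt_succ (n : Nat) : (fp n).2 < (fp (n + 1)).2 := by
  have := fp_pos n; simp [fp]; omega

theorem fp_mono {n m : Nat} (h : n ≤ m) : (fp n).2 ≤ (fp m).2 := by
  induction m with
  | zero => have : n = 0 := by omega
            simp [this]
  | succ m ih =>
    rcases Nat.lt_or_ge n (m + 1) with h'  | h'
    · exact le_trans (ih (by omega)) (le_of_lt (fp_lt_succ m))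
    · have : n = m + 1 := by omega
      simp [this]

theorem fp_strict_mono {n m : Nat} (h : n < m) : (fp n).2 < (fp m).2 := by
  have := fp_lt_succ n
  have := fp_mono (show n + 1 ≤ m by omega)
  omega

theorem fibFindA_char (fib : Int) (n : Nat) (h1 : 0 < (fp n).1) (h2 : (fp n).1 < (fp n).2) :
    ∃ k, n ≤ k ∧
      fibFindA (fp n).1 (fp n).2 ((n : Int) + 1) fib h1 h2 = ((fp k).1, (fp k).2, (k : Int) + 1) ∧
      fib ≤ (fp k).2 ∧ (∀ l, n ≤ l → l < k → (fp l).2 < fib) := by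
  rw [fibFindA]
  split
  · rename_i hlt
    have hrec := fibFindA_char fib (n + 1) (fp_pos (n + 1)).1 (fp_pos (n + 1)).2
    simp only [fp] at hrec
    push_cast at hrec
    obtain ⟨k, hk1, hk2, hk3, hk4⟩ := hrec
    refine ⟨k, by omega, ?_, hk3, ?_⟩
    · rw [← hk2]
    · intro l hl1 hl2
      rcases Nat.lt_or_ge l (n + 1) with h' | h'
      · have : l = n := by omega
        simpa [this] using hlt
      · exact hk4 l h' hl2
  · rename_i hge
    exact ⟨n, le_refl n, rfl, by omega, by omega⟩
termination_by (fib - (fp n).2).toNat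
decreasing_by have := fp_lt_succ n; omega

theorem fibFindA_iff (fib i : Int) :
    ((fibFindA0 fib).2.1 = fib ∧ (fibFindA0 fib).2.2 = i)
    ↔ ∃ j : Nat, (j : Int) + 1 = i ∧ fib = (fp j).2 := by
  obtain ⟨k, -, hk2, hk3, hk4⟩ := fibFindA_char fib 0 (fp_pos 0).1 (fp_pos 0).2
  have hmain : fibFindA0 fib = ((fp k).1, (fp k).2, (k : Int) + 1) := hk2
  rw [hmain]
  constructor
  · rintro ⟨hb, hi⟩
    exact ⟨k, hi, hb.symm⟩
  · rintro ⟨j, hj1, hj2⟩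
    have hkj : k = j := by
      rcases Nat.lt_trichotomy k j with h | h | h
      · have := fp_strict_mono h; omega
      · exact h
      · have := hk4 j (Nat.zero_le j) h; omega
    subst hkj
    exact ⟨hj2.symm, hj1⟩

theorem fibCollectB_char (s : PySem.Set Int) (m mfi : Int) (j : Int) (n : Nat)
    (a b idx : Int) (acc : PySem.Set Int) (h1 : 0 < a) (h2 : a < b)
    (ha : a = (fp n).1) (hb : b = (fp n).2) (hidx : idx = (n : Int) + 1) :
    j ∈ fibCollectB s m mfi a b idx acc h1 h2 ↔
      j ∈ acc ∨ ∃ k : Nat, n ≤ k ∧ j = (k : Int) + 1 ∧ (k : Int) + 1 < mfi ∧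
        (fp k).2 ≤ m ∧ (fp k).2 ∈ s := by
  rw [fibCollectB]
  split
  · rename_i hcond
    rw [fibCollectB_char s m mfi j (n + 1) b (a + b) (idx + 1) _ (by omega) (by omega)
        (by simp [fp, hb]) (by simp [fp, ha, hb]) (by push_cast; omega)]
    have hsplit : ∀ k : Nat, n ≤ k ↔ (k = n ∨ n + 1 ≤ k) := by omega
    constructor
    · rintro (hacc | ⟨k, hk1, hk2, hk3, hk4, hk5⟩)
      · split at hacc
        · rename_i hc
          rcases (PySem.Set.mem_add _ _ _).1 hacc with h | h
          · exact Or.inl h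
          · exact Or.inr ⟨n, le_refl n, by omega, by omega, by omega, by
              rw [hb] at hc; exact (PySem.Set.contains_iff _ _).1 hc⟩
        · exact Or.inl hacc
      · exact Or.inr ⟨k, by omega, hk2, hk3, hk4, hk5⟩
    · rintro (hacc | ⟨k, hk1, hk2, hk3, hk4, hk5⟩)
      · left
        split
        · exact (PySem.Set.mem_add _ _ _).2 (Or.inl hacc)
        · exact hacc
      · rcases (hsplit k).1 hk1 with hkn | hkn
        · subst hkn
          left
          have hc : PySem.Set.contains s b = true := by
            rw [hb]; exact (PySem.Set.contains_iff _ _).2 hk5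
          simp only [hc, if_pos]
          exact (PySem.Set.mem_add _ _ _).2 (Or.inr (by omega))
        · exact Or.inr ⟨k, hkn, hk2, hk3, hk4, hk5⟩
  · rename_i hcond
    constructor
    · exact Or.inl
    · rintro (hacc | ⟨k, hk1, hk2, hk3, hk4, hk5⟩)
      · exact hacc
      · exfalso
        have := fp_mono hk1
        omega
termination_by (m + 1 - b).toNat
decreasing_by subst ha hb; have := fp_pos n; omega

theorem length_stepA (mfi : Int) (bin : List Char) (fib : Int) :
    (stepA mfi bin fib).length = bin.length := by
  unfold stepA
  dsimp only
  split <;> simp [PySem.List.length_pySetD]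

theorem length_foldl_stepA (mfi : Int) (l : List Int) (bin : List Char) :
    (l.foldl (stepA mfi) bin).length = bin.length := by
  induction l generalizing bin with
  | nil => rfl
  | cons f t ih => simp [List.foldl_cons, ih, length_stepA]

theorem getElem?_foldl_stepA (mfi : Int) (l : List Int) (bin : List Char) (p : Nat)
    (hp : p < bin.length) :
    (l.foldl (stepA mfi) bin)[p]? =
      some (if (∃ fib ∈ l, (fibFindA0 fib).2.1 = fib ∧ (fibFindA0 fib).2.2 < mfi ∧
            (mfi - (fibFindA0 fib).2.2 - 1).toNat = p)
      then '1' else bin[p]'hp) := by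
  induction l generalizing bin with
  | nil => simp [List.getElem?_eq_getElem hp]
  | cons f t ih =>
    simp only [List.foldl_cons]
    have hp' : p < (stepA mfi bin f).length := by rw [length_stepA]; exact hp
    rw [ih (stepA mfi bin f) hp']
    congr 1
    have hstepq : (stepA mfi bin f)[p]? =
        some (if (fibFindA0 f).2.1 = f ∧ (fibFindA0 f).2.2 < mfi ∧
            (mfi - (fibFindA0 f).2.2 - 1).toNat = p then '1' else bin[p]'hp) := by
      unfold stepA
      dsimp only
      split
      · rename_i hcond
        rw [PySem.List.pySetD_of_nonneg bin '1' (by omega)]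
        rw [List.getElem?_set]
        split_ifs with hh1 hh2 hh3 hh4
        · rfl
        · exact absurd ⟨hcond.1, hcond.2, hh1⟩ hh3
        · exact absurd (hh1 ▸ hp) hh2
        · exact absurd hh4.2.2 hh1
        · exact List.getElem?_eq_getElem hp
      · rename_i hcond
        rw [List.getElem?_eq_getElem hp]
        rw [if_neg (fun hh => hcond ⟨hh.1, hh.2.1⟩)]
    have hstep : (stepA mfi bin f)[p]'hp' =
        if (fibFindA0 f).2.1 = f ∧ (fibFindA0 f).2.2 < mfi ∧
            (mfi - (fibFindA0 f).2.2 - 1).toNat = p then '1' else bin[p]'hp := by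
      rw [List.getElem?_eq_getElem hp'] at hstepq
      exact Option.some.inj hstepq
    rw [hstep]
    by_cases hf : (fibFindA0 f).2.1 = f ∧ (fibFindA0 f).2.2 < mfi ∧
        (mfi - (fibFindA0 f).2.2 - 1).toNat = p
    · rw [if_pos hf,
          if_pos (show ∃ fib ∈ f :: t, (fibFindA0 fib).2.1 = fib ∧ (fibFindA0 fib).2.2 < mfi ∧
              (mfi - (fibFindA0 fib).2.2 - 1).toNat = p
            from ⟨f, List.mem_cons.2 (Or.inl rfl), hf⟩)]
      split <;> rfl
    · rw [if_neg hf]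
      by_cases ht : ∃ fib ∈ t, (fibFindA0 fib).2.1 = fib ∧ (fibFindA0 fib).2.2 < mfi ∧
          (mfi - (fibFindA0 fib).2.2 - 1).toNat = p
      · rw [if_pos ht]
        obtain ⟨fib, hmem, hfib⟩ := ht
        rw [if_pos ⟨fib, List.mem_cons_of_mem f hmem, hfib⟩]
      · rw [if_neg ht]
        rw [if_neg (by rintro ⟨fib, hmem, hfib⟩
                       rcases List.mem_cons.1 hmem with h | h
                       · exact hf (h ▸ hfib)
                       · exact ht ⟨fib, h, hfib⟩)]

theorem ofList_eq_nil_iff (xs : List Int) : PySem.Set.ofList xs = [] ↔ xs = [] := by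
  constructor
  · intro h
    cases xs with
    | nil => rfl
    | cons x t =>
      exfalso
      have : x ∈ PySem.Set.ofList (x :: t) := (PySem.Set.mem_ofList _ _).2 (List.mem_cons.2 (Or.inl rfl))
      rw [h] at this
      exact List.not_mem_nil this
  · intro h
    subst h
    rfl

theorem main_eq (zeck : List Int) (mfi : Int) :
    binary_from_zeckendorf zeck mfi = binary_from_zeckendorf_alt zeck mfi := by
  unfold binary_from_zeckendorf binary_from_zeckendorf_alt
  refine congrArg String.mk ?_
  apply List.ext_getElem?
  intro p
  by_cases hp : p < mfi.toNat
  · have hp1 : p < (List.replicate mfi.toNat '0').length := by simp [hp]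
    rw [getElem?_foldl_stepA mfi zeck _ p hp1]
    rw [List.getElem?_map, List.getElem?_range hp]
    simp only [Option.map_some]
    congr 1
    rw [List.getElem_replicate]
    have key : (∃ fib ∈ zeck, (fibFindA0 fib).2.1 = fib ∧ (fibFindA0 fib).2.2 < mfi ∧
        (mfi - (fibFindA0 fib).2.2 - 1).toNat = p) ↔
        ∃ j : Nat, (j : Int) + 1 = mfi - (p : Int) - 1 ∧ (fp j).2 ∈ zeck := by
      constructor
      · rintro ⟨fib, hmem, h1, h2, h3⟩
        obtain ⟨j, hj1, hj2⟩ := (fibFindA_iff fib ((fibFindA0 fib).2.2)).1 ⟨h1, rfl⟩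
        exact ⟨j, by omega, by rw [← hj2]; exact hmem⟩
      · rintro ⟨j, hj1, hmem⟩
        have h := (fibFindA_iff ((fp j).2) ((j : Int) + 1)).2 ⟨j, rfl, rfl⟩
        have hx := h.2
        exact ⟨(fp j).2, hmem, h.1, by omega, by omega⟩
    have key2 : (PySem.Set.contains
        (match PySem.List.max? (PySem.Set.ofList zeck) (fun x => x) with
          | none => PySem.Set.empty
          | some m => fibCollectB (PySem.Set.ofList zeck) m mfi 1 2 1 PySem.Set.empty
              (by norm_num) (by norm_num))
        (mfi - (p : Int) - 1) = true) ↔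
        ∃ j : Nat, (j : Int) + 1 = mfi - (p : Int) - 1 ∧ (fp j).2 ∈ zeck := by
      cases hmax : PySem.List.max? (PySem.Set.ofList zeck) (fun x => x) with
      | none =>
        have hz : zeck = [] := (ofList_eq_nil_iff zeck).1
          ((PySem.List.max?_eq_none_iff _ _).1 hmax)
        subst hz
        simp [PySem.Set.empty, PySem.Set.contains]
      | some m =>
        rw [PySem.Set.contains_iff]
        rw [fibCollectB_char (PySem.Set.ofList zeck) m mfi (mfi - (p : Int) - 1) 0 1 2 1
          PySem.Set.empty (by norm_num) (by norm_num) (by simp [fp]) (by simp [fp]) (by norm_num)]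
        constructor
        · rintro (habs | ⟨k, -, hk2, hk3, -, hk5⟩)
          · exact absurd habs (List.not_mem_nil)
          · exact ⟨k, hk2.symm, (PySem.Set.mem_ofList _ _).1 hk5⟩
        · rintro ⟨j, hj1, hmem⟩
          have hmemS : (fp j).2 ∈ PySem.Set.ofList zeck := (PySem.Set.mem_ofList _ _).2 hmem
          have hle : (fp j).2 ≤ m := PySem.List.max?_isMax hmax _ hmemS
          exact Or.inr ⟨j, Nat.zero_le j, hj1.symm, by omega, hle, hmemS⟩
    exact if_congr (key.trans key2.symm) rfl rfl
  · rw [List.getElem?_eq_none (by rw [length_foldl_stepA]; simp; omega)]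
    rw [List.getElem?_eq_none (by simp; omega)]

-- ===== VERDICT (by name: the statement is the Claim_ definition above) =====
theorem binary_from_zeckendorf_spec : Claim_equal_binary_from_zeckendorf := by
  intro zeck mfi _
  exact main_eq zeck mfi
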